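-- pv_equiv track=rewrite | github.com/AkshatRastogi-1nC0re/HTPRED | HTPred_Code/COFormula.py | xnorcfc
-- ===== SOURCE A (Python) =====
-- def xnorcfc(cc0, cc1):
--     f_cc0 = min(cc1[0], cc0[0])
--     f_cc1 = min(cc0[0], cc1[0])
--
--     for i in range(1, len(cc0)):
--         temp_cc0 = min(f_cc1 + cc0[i], f_cc0 + cc1[i])
--         temp_cc1 = min(f_cc0 + cc0[i], f_cc1 + cc1[i])
--         f_cc0 = temp_cc0
--         f_cc1 = temp_cc1
--
--     return f_cc0 + 1, f_cc1 + 1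
-- ===== SOURCE B (Python) =====
-- def xnorcfc(cc0, cc1):
--     # Both DP states are always equal, so keep a single running total.
--     total = min(cc0[0], cc1[0])
--     for i in range(1, len(cc0)):
--         total += min(cc0[i], cc1[i])
--     return total + 1, total + 1
-- ===== Notes on version B (the rewrite author's own statement) =====
-- stated objective: simpler
-- what changed: The two mutually recurring DP states start equal and stay equal, so B collapses them to one running sum of elementwise minima and returns (total+1, total+1).
import Mathlib
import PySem

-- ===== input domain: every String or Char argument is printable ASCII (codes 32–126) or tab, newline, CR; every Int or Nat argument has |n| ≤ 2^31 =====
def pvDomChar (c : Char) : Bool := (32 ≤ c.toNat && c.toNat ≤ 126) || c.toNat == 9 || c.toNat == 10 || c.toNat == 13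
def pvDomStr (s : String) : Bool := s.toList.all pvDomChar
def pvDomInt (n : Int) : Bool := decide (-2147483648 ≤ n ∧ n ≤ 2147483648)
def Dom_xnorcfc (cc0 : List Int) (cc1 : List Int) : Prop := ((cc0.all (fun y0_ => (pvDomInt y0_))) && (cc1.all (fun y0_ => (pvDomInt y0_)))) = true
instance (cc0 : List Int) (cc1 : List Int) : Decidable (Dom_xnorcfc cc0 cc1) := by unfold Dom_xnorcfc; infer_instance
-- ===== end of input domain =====

-- B collapses A's two equal DP states into a single running sum of elementwise minima (objective: simpler).
-- ===== PORT A =====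
def xnorcfcStepA (cc0 cc1 : List Int) (st : Int × Int) (i : Int) : Int × Int :=
  let tmp0 := min (st.2 + PySem.List.pyGetD cc0 i 0) (st.1 + PySem.List.pyGetD cc1 i 0)
  let tmp1 := min (st.1 + PySem.List.pyGetD cc0 i 0) (st.2 + PySem.List.pyGetD cc1 i 0)
  (tmp0, tmp1)

def xnorcfc (cc0 : List Int) (cc1 : List Int) : Int × Int :=
  let f_cc0 := min (PySem.List.pyGetD cc1 0 0) (PySem.List.pyGetD cc0 0 0)
  let f_cc1 := min (PySem.List.pyGetD cc0 0 0) (PySem.List.pyGetD cc1 0 0)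
  let s := (PySem.List.pyRange 1 cc0.length 1).foldl (xnorcfcStepA cc0 cc1) (f_cc0, f_cc1)
  (s.1 + 1, s.2 + 1)

-- ===== PORT B =====
def xnorcfc_alt (cc0 : List Int) (cc1 : List Int) : Int × Int :=
  let total := (PySem.List.pyRange 1 cc0.length 1).foldl
    (fun t i => t + min (PySem.List.pyGetD cc0 i 0) (PySem.List.pyGetD cc1 i 0))
    (min (PySem.List.pyGetD cc0 0 0) (PySem.List.pyGetD cc1 0 0))
  (total + 1, total + 1)

-- ===== PRECONDITION & SPEC =====
-- Pre_ excludes exactly the inputs where the Python A raises IndexError: empty lists and cc1 shorter than cc0.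
def Pre_xnorcfc (cc0 : List Int) (cc1 : List Int) : Prop :=
  cc0 ≠ [] ∧ cc1 ≠ [] ∧ cc0.length ≤ cc1.length
instance (cc0 : List Int) (cc1 : List Int) : Decidable (Pre_xnorcfc cc0 cc1) := by
  unfold Pre_xnorcfc; infer_instance
def pvWitness_xnorcfc : List Int × List Int := ([2, -1, 3], [1, 4, -2])

def Spec_xnorcfc (cc0 : List Int) (cc1 : List Int) (out : Int × Int) : Prop := out = xnorcfc_alt cc0 cc1
instance (cc0 : List Int) (cc1 : List Int) (out : Int × Int) : Decidable (Spec_xnorcfc cc0 cc1 out) := by unfold Spec_xnorcfc; infer_instance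

-- ===== CLAIM (what is proved, stated in full; the proofs are below) =====
def Claim_equal_xnorcfc : Prop := ∀ (cc0 : List Int) (cc1 : List Int), Dom_xnorcfc cc0 cc1 → Pre_xnorcfc cc0 cc1 → Spec_xnorcfc cc0 cc1 (xnorcfc cc0 cc1)

-- ===== LEMMAS AND PROOFS =====
-- Invariant: starting from an equal pair, A's fold stays an equal pair whose value is B's fold.
theorem xnorcfc_fold_inv (cc0 cc1 : List Int) (l : List Int) (f : Int) :
    l.foldl (xnorcfcStepA cc0 cc1) (f, f)
      = (l.foldl (fun t i => t + min (PySem.List.pyGetD cc0 i 0) (PySem.List.pyGetD cc1 i 0)) f,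
         l.foldl (fun t i => t + min (PySem.List.pyGetD cc0 i 0) (PySem.List.pyGetD cc1 i 0)) f) := by
  induction l generalizing f with
  | nil => rfl
  | cons i l ih =>
      simp only [List.foldl_cons]
      have hstep : xnorcfcStepA cc0 cc1 (f, f) i
          = (f + min (PySem.List.pyGetD cc0 i 0) (PySem.List.pyGetD cc1 i 0),
             f + min (PySem.List.pyGetD cc0 i 0) (PySem.List.pyGetD cc1 i 0)) := by
        unfold xnorcfcStepA
        simp only [Int.min_def]
        split_ifs <;> simp_all <;> omega
      rw [hstep, ih]

-- ===== VERDICT (by name: the statement is the Claim_ definition above) =====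
theorem xnorcfc_spec : Claim_equal_xnorcfc := by
  intro cc0 cc1 _ _
  unfold Spec_xnorcfc xnorcfc xnorcfc_alt
  rw [min_comm (PySem.List.pyGetD cc1 0 0) (PySem.List.pyGetD cc0 0 0)]
  simp only [xnorcfc_fold_inv]
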